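-- pv_equiv track=rewrite | github.com/lanasheep/graph_DB | src/chomsky.py | delete_long_prods
-- ===== SOURCE A (Python) =====
-- def is_term(symbol):
--     return symbol[0].islower()
--
-- def delete_long_prods(prods):
--     nonterms = set()
--     for prod in prods:
--         nonterms.add(prod[0])
--         for symb in prod[1]:
--             if not is_term(symb):
--                 nonterms.add(symb)
--
--     new_prods = []
--     cnt = 0
--     for prod in prods:
--         if (len(prod[1]) > 2):
--             new_nonterms = []
--             for i in range(len(prod[1]) - 1):
--                 num = 0
--                 find = False
--                 while not find:
--                     if not ("A" + str(num)) in nonterms: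
--                         find = True
--                     else:
--                         num += 1
--                 new_nonterms.append("A" + str(num))
--             nonterms |= set(new_nonterms)
--             last = prod[0]
--             for i, new_nonterm in enumerate(new_nonterms):
--                 if i + 2 < len(prod[1]):
--                     new_prods.append((last, [prod[1][i], new_nonterms[i]]))
--                     last = new_nonterm
--                 else:
--                     new_prods.append((last, [prod[1][i], prod[1][i + 1]]))
--             cnt += 1
--         else:
--             new_prods.append(prod)
--
--     return new_prods
-- ===== SOURCE B (Python) =====
-- def is_term(symbol):
--     return symbol[0].islower()
--
-- def delete_long_prods(prods):
--     nonterms = set()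
--     for head, body in prods:
--         nonterms.add(head)
--         for symb in body:
--             if not is_term(symb):
--                 nonterms.add(symb)
--
--     new_prods = []
--     for head, body in prods:
--         n = len(body)
--         if n <= 2:
--             new_prods.append((head, body))
--         else:
--             # mint ONE fresh nonterminal for the whole chain: the lowest free "A#"
--             num = 0
--             while ("A" + str(num)) in nonterms:
--                 num += 1
--             f = "A" + str(num)
--             nonterms.add(f)
--             new_prods += [(head, [body[0], f])] \
--                 + [(f, [body[i], f]) for i in range(1, n - 2)] \
--                 + [(f, [body[-2], body[-1]])]
--     return new_prods
-- ===== Notes on version B (the rewrite author's own statement) =====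
-- stated objective: faster
-- what changed: B mints the single fresh nonterminal once per long production (A re-runs the linear lowest-free-'A#' search over the nonterminal set len(body)-1 times, always getting the same name) and emits the binary chain directly as head-production + list comprehension of middle links + final production, replacing A's enumerate/'last' state machine.
import Mathlib
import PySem

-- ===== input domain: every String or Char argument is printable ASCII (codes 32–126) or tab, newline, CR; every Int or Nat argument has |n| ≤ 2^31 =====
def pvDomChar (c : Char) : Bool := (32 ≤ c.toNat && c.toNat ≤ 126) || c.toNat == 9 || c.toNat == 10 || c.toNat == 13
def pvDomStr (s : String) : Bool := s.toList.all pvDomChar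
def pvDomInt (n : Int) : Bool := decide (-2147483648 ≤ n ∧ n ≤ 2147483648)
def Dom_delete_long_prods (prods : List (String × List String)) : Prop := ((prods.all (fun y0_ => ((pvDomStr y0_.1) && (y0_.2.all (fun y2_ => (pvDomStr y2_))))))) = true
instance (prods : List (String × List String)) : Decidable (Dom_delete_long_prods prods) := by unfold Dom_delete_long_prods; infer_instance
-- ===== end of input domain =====

-- B mints the single fresh "A#" nonterminal once per long production and emits the binary
-- chain directly (head rule ++ middle links ++ final rule), instead of A's per-symbol repeated
-- fresh-name search and enumerate/'last' state machine; same return value, simpler decomposition.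


-- ===== PORT A =====
-- is_term(symbol) = symbol[0].islower(); total pyGetD form, exact under Pre_ (body symbols nonempty)
def pvIsTerm (symbol : String) : Bool :=
  PySem.Chars.islower (PySem.List.pyGetD symbol.toList 0 ' ')

-- 'num = 0; while ("A" + str(num)) in nonterms: num += 1' (both Pythons contain this loop
-- verbatim); the fuel only guards totality: |nonterms| + 1 candidate names are distinct,
-- so the Python loop stops within that many steps
def pvFindNum (nt : PySem.Set String) : Nat → Int → Int
  | 0, num => num
  | fuel + 1, num =>
    if PySem.Set.contains nt (String.ofList ('A' :: PySem.Int.toChars num)) then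
      pvFindNum nt fuel (num + 1)
    else num

-- first collection pass, textually identical in A and in B: heads and non-terminal body symbols
def pvCollect (prods : List (String × List String)) : PySem.Set String :=
  prods.foldl (fun nt prod =>
    prod.2.foldl (fun nt symb => if !pvIsTerm symb then PySem.Set.add nt symb else nt)
      (PySem.Set.add nt prod.1)) PySem.Set.empty

-- the body of A's second 'for prod in prods' loop (state: new_prods, nonterms, cnt)
def pvStepA (st : List (String × List String) × PySem.Set String × Int)
    (prod : String × List String) : List (String × List String) × PySem.Set String × Int :=
  if ((prod.2.length : Int) > 2) then
    let new_nonterms : List String :=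
      (PySem.List.pyRange 0 ((prod.2.length : Int) - 1) 1).foldl
        (fun acc _i =>
          acc ++ [String.ofList ('A' :: PySem.Int.toChars (pvFindNum st.2.1 (st.2.1.length + 1) 0))]) []
    let nt' := PySem.Set.union st.2.1 new_nonterms
    let r := (PySem.List.enumerate new_nonterms).foldl
      (fun (q : List (String × List String) × String) iv =>
        if iv.1 + 2 < (prod.2.length : Int) then
          (q.1 ++ [(q.2, [PySem.List.pyGetD prod.2 iv.1 "",
                          PySem.List.pyGetD new_nonterms iv.1 ""])], iv.2)
        else
          (q.1 ++ [(q.2, [PySem.List.pyGetD prod.2 iv.1 "",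
                          PySem.List.pyGetD prod.2 (iv.1 + 1) ""])], q.2))
      (st.1, prod.1)
    (r.1, nt', st.2.2 + 1)
  else (st.1 ++ [prod], st.2.1, st.2.2)

def delete_long_prods (prods : List (String × List String)) : List (String × List String) :=
  (prods.foldl pvStepA ([], pvCollect prods, 0)).1

-- ===== PORT B =====
-- the body of B's second loop (state: new_prods, nonterms)
def pvStepB (st : List (String × List String) × PySem.Set String)
    (p : String × List String) : List (String × List String) × PySem.Set String :=
  if ((p.2.length : Int) ≤ 2) then (st.1 ++ [p], st.2)
  else
    let f := String.ofList ('A' :: PySem.Int.toChars (pvFindNum st.2 (st.2.length + 1) 0))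
    (st.1 ++ [(p.1, [PySem.List.pyGetD p.2 0 "", f])]
          ++ (PySem.List.pyRange 1 ((p.2.length : Int) - 2) 1).map
               (fun i => (f, [PySem.List.pyGetD p.2 i "", f]))
          ++ [(f, [PySem.List.pyGetD p.2 (-2) "", PySem.List.pyGetD p.2 (-1) ""])],
     PySem.Set.add st.2 f)

def delete_long_prods_alt (prods : List (String × List String)) : List (String × List String) :=
  (prods.foldl pvStepB ([], pvCollect prods)).1

-- ===== PRECONDITION & SPEC =====
-- Pre_ excludes productions whose body contains the empty string: there Python's is_term
-- evaluates symbol[0] and A raises IndexError (B raises the same way).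
def Pre_delete_long_prods (prods : List (String × List String)) : Prop :=
  ∀ p ∈ prods, ∀ s ∈ p.2, s ≠ ""
instance (prods : List (String × List String)) : Decidable (Pre_delete_long_prods prods) := by
  unfold Pre_delete_long_prods; infer_instance

def pvWitness_delete_long_prods : (List (String × List String)) :=
  [("S", ["a", "b", "c"])]

def Spec_delete_long_prods (prods : List (String × List String)) (out : List (String × List String)) : Prop := out = delete_long_prods_alt prods
instance (prods : List (String × List String)) (out : List (String × List String)) : Decidable (Spec_delete_long_prods prods out) := by unfold Spec_delete_long_prods; infer_instance

-- ===== CLAIM (what is proved, stated in full; the proofs are below) =====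
def Claim_equal_delete_long_prods : Prop := ∀ (prods : List (String × List String)), Dom_delete_long_prods prods → Pre_delete_long_prods prods → Spec_delete_long_prods prods (delete_long_prods prods)

-- ===== LEMMAS AND PROOFS =====

-- set-union with a nonempty constant list is a single add
lemma foldl_add_replicate (k : Nat) (s : PySem.Set String) (x : String) :
    (List.replicate (k + 1) x).foldl PySem.Set.add s = PySem.Set.add s x := by
  induction k generalizing s with
  | zero => rfl
  | succ k ih =>
    rw [List.replicate_succ, List.foldl_cons]
    have h : PySem.Set.add (PySem.Set.add s x) x = PySem.Set.add s x := by
      unfold PySem.Set.add PySem.Set.contains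
      split_ifs with h1 <;> simp_all
    calc (List.replicate (k+1) x).foldl PySem.Set.add (PySem.Set.add s x)
        = PySem.Set.add (PySem.Set.add s x) x := ih _
      _ = PySem.Set.add s x := h

-- enumerate of a constant list is a decorated range
lemma enumerate_replicate (x : String) : ∀ (m : Nat) (j : Int),
    PySem.List.enumerate (List.replicate m x) j
      = (PySem.List.pyRange j (j + m) 1).map (fun i => (i, x)) := by
  intro m
  induction m with
  | zero => intro j; simp [PySem.List.enumerate_nil, PySem.List.pyRange_one_eq_nil]
  | succ m ih =>
    intro j
    rw [List.replicate_succ, PySem.List.enumerate_cons, ih (j+1),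
        PySem.List.pyRange_one_cons (a := j) (b := j + ((m+1 : Nat):Int)) (by push_cast; omega)]
    have he : j + 1 + (m:Int) = j + ((m+1 : Nat):Int) := by push_cast; ring
    rw [he]
    simp

-- A's enumerate/'last' emission loop over the constant chain name f, from index j ≥ 1 on,
-- produces exactly the middle links followed by the final production
lemma emit_mid (b : List String) (f : String) (m : Nat) (hmb : b.length = m + 1) :
  ∀ (k : Nat) (j : Int), 1 ≤ j → j + k = (m:Int) - 1 → ∀ acc,
  (PySem.List.pyRange j (m:Int) 1).foldl
    (fun (q : List (String × List String) × String) (i : Int) =>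
      if i + 2 < (b.length:Int) then (q.1 ++ [(q.2, [PySem.List.pyGetD b i "", f])], f)
      else (q.1 ++ [(q.2, [PySem.List.pyGetD b i "", PySem.List.pyGetD b (i+1) ""])], q.2))
    (acc, f)
  = (acc ++ (PySem.List.pyRange j ((m:Int)-1) 1).map (fun i => (f, [PySem.List.pyGetD b i "", f]))
        ++ [(f, [PySem.List.pyGetD b ((m:Int)-1) "", PySem.List.pyGetD b (m:Int) ""])], f) := by
  intro k
  induction k with
  | zero =>
    intro j hj1 hjk acc
    have hj : j = (m:Int) - 1 := by omega
    rw [hj, PySem.List.pyRange_one_cons (by omega), PySem.List.pyRange_one_eq_nil (by omega)]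
    simp only [List.foldl_cons, List.foldl_nil]
    rw [if_neg (by omega), PySem.List.pyRange_one_eq_nil (by omega)]
    have h1 : (m:Int) - 1 + 1 = (m:Int) := by ring
    rw [h1]
    simp
  | succ k ih =>
    intro j hj1 hjk acc
    rw [PySem.List.pyRange_one_cons (by omega)]
    simp only [List.foldl_cons]
    rw [if_pos (by omega), ih (j+1) (by omega) (by omega)]
    rw [PySem.List.pyRange_one_cons (a := j) (b := (m:Int)-1) (by omega)]
    simp [List.append_assoc]

-- one production: the two step functions agree on the (new_prods, nonterms) components
lemma step_eq (out : List (String × List String)) (nt : PySem.Set String) (cnt : Int)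
    (p : String × List String) :
    (pvStepA (out, nt, cnt) p).1 = (pvStepB (out, nt) p).1 ∧
    (pvStepA (out, nt, cnt) p).2.1 = (pvStepB (out, nt) p).2 := by
  rcases p with ⟨hd, b⟩
  by_cases hlen : (b.length : Int) > 2
  · have hL : 3 ≤ b.length := by omega
    unfold pvStepA pvStepB
    dsimp only
    rw [if_pos hlen, if_neg (by omega)]
    set f := String.ofList ('A' :: PySem.Int.toChars (pvFindNum nt (nt.length + 1) 0)) with hf
    have hnew : (PySem.List.pyRange 0 ((b.length:Int) - 1) 1).foldl
        (fun acc _i => acc ++ [f]) [] = List.replicate (b.length - 1) f := by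
      rw [PySem.List.foldl_append_singleton_eq_map (f := fun _ => f)]
      simp [List.map_const', PySem.List.length_pyRange_one]
    rw [hnew]
    refine ⟨?_, ?_⟩
    · -- output components
      dsimp only
      rw [enumerate_replicate f (b.length - 1) 0]
      simp only [zero_add]
      rw [List.foldl_map]
      rw [PySem.List.foldl_congr_mem _ _
        (fun (q : List (String × List String) × String) (i : Int) =>
          if i + 2 < (b.length:Int) then (q.1 ++ [(q.2, [PySem.List.pyGetD b i "", f])], f)
          else (q.1 ++ [(q.2, [PySem.List.pyGetD b i "", PySem.List.pyGetD b (i+1) ""])], q.2))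
        _ ?hcongr]
      case hcongr =>
        intro acc i hi
        rw [PySem.List.mem_pyRange_one] at hi
        dsimp only
        by_cases hc : i + 2 < (b.length:Int)
        · rw [if_pos hc, if_pos hc]
          rw [PySem.List.pyGetD_eq_getElem (xs := List.replicate (b.length - 1) f) (i := i)
                (d := "") (by omega) (by simp; omega)]
          simp
        · rw [if_neg hc, if_neg hc]
      rw [PySem.List.pyRange_one_cons (a := 0) (b := ((b.length - 1 : Nat):Int)) (by omega)]
      simp only [List.foldl_cons]
      rw [if_pos (by omega)]
      simp only [zero_add]
      rw [emit_mid b f (b.length - 1) (by omega) (b.length - 3) 1 (by omega) (by omega)]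
      have e1 : ((b.length - 1 : Nat):Int) - 1 = (b.length:Int) - 2 := by omega
      have e2 : PySem.List.pyGetD b ((b.length:Int) - 2) "" = PySem.List.pyGetD b (-2) "" := by
        rw [PySem.List.pyGetD_neg_ofNat b 2 "" (by omega) (by omega),
            PySem.List.pyGetD_eq_getElem (xs := b) (i := (b.length:Int) - 2) (d := "")
              (by omega) (by omega)]
        congr 1
        omega
      have e3 : PySem.List.pyGetD b (((b.length - 1 : Nat)):Int) "" = PySem.List.pyGetD b (-1) "" := by
        rw [PySem.List.pyGetD_neg_ofNat b 1 "" (by omega) (by omega),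
            PySem.List.pyGetD_eq_getElem (xs := b) (i := ((b.length - 1 : Nat):Int)) (d := "")
              (by omega) (by omega)]
        simp
      rw [e1, e2, e3]
    · -- nonterms components
      dsimp only
      show PySem.Set.union nt (List.replicate (b.length - 1) f) = PySem.Set.add nt f
      unfold PySem.Set.union PySem.Set.update
      rw [show b.length - 1 = (b.length - 2) + 1 from by omega, foldl_add_replicate]
  · unfold pvStepA pvStepB
    dsimp only
    rw [if_neg hlen, if_pos (by omega)]
    exact ⟨rfl, rfl⟩

lemma fold_eq (t : List (String × List String)) :
    ∀ (st1 : List (String × List String) × PySem.Set String × Int)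
      (st2 : List (String × List String) × PySem.Set String),
      st2 = (st1.1, st1.2.1) →
      (t.foldl pvStepA st1).1 = (t.foldl pvStepB st2).1 := by
  induction t with
  | nil => intro st1 st2 h; rw [h]; rfl
  | cons p t ih =>
    intro st1 st2 h
    simp only [List.foldl_cons]
    apply ih
    subst h
    obtain ⟨h1, h2⟩ := step_eq st1.1 st1.2.1 st1.2.2 p
    rw [Prod.ext_iff]
    exact ⟨h1.symm, h2.symm⟩

-- ===== VERDICT (by name: the statement is the Claim_ definition above) =====
theorem delete_long_prods_spec : Claim_equal_delete_long_prods := by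
  intro prods _ _
  unfold Spec_delete_long_prods delete_long_prods delete_long_prods_alt
  exact fold_eq prods ([], pvCollect prods, 0) ([], pvCollect prods) rfl
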